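-- pv_equiv track=rewrite | github.com/gasparka/wifi | ieee80211phy/conv_coding.py | _puncture
-- ===== SOURCE A (Python) =====
-- from textwrap import wrap
--
-- def _puncture(data, rate, undo=False):
--     """
--     Puncturing is a procedure for omitting some of the encoded bits in the transmitter
--     (thus reducing the number of transmitted bits and increasing the coding rate)
--     and inserting a dummy “zero” metric into the convolutional decoder on the
--     receive side in place of the omitted bits. The puncturing patterns are illustrated in Figure 17-9.
--     """
--
--     if undo:
--         # un-puncturing process i.e. add 'X' characters that are ignored by the error calculation
--         if rate == '3/4':
--             data = [d[:3] + 'XX' + d[3] for d in wrap(data, 4)]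
--         elif rate == '2/3':
--             data = [d + 'X' for d in wrap(data, 3)]
--     else:
--         if rate == '2/3':
--             # throw out ech 3. bit in a block of 4
--             data = [bit for i, bit in enumerate(data) if (i % 4) != 3]
--         elif rate == '3/4':
--             # throw out each 3. and 4. bit in a block of 6 bits
--             data = [bit for i, bit in enumerate(data) if (i % 6) != 3 and (i % 6) != 4]
--     return ''.join(data)
-- ===== SOURCE B (Python) =====
-- def _puncture(data, rate, undo=False):
--     # Block-based re-implementation: chunk the string with a stride and slice
--     # each block, instead of textwrap.wrap on one side and a flat
--     # enumerate+modulo filter on the other.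
--     if undo:
--         if rate == '3/4':
--             return ''.join(data[i:i + 3] + 'XX' + data[i + 3:i + 4]
--                            for i in range(0, len(data), 4))
--         if rate == '2/3':
--             return ''.join(data[i:i + 3] + 'X'
--                            for i in range(0, len(data), 3))
--     else:
--         if rate == '2/3':
--             return ''.join(data[i:i + 3]
--                            for i in range(0, len(data), 4))
--         if rate == '3/4':
--             return ''.join(data[i:i + 3] + data[i + 5:i + 6]
--                            for i in range(0, len(data), 6))
--     return data
-- ===== Notes on version B (the rewrite author's own statement) =====
-- stated objective: alternative
-- what changed: B chunks the string with a stride and slices each block uniformly in all four branches, replacing A's textwrap.wrap list comprehensions on the undo side and its flat enumerate+modulo per-bit filter on the puncture side.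
-- outside the precondition, e.g. on _puncture('01 1', '2/3', True): A returns '01X1X', B returns '01 X1X'; on _puncture('0-00', '2/3', True): A returns '0-X00X', B returns '0-0X0X'; on _puncture('000', '3/4', True): A raises IndexError, B returns '000XX'
import Mathlib
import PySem

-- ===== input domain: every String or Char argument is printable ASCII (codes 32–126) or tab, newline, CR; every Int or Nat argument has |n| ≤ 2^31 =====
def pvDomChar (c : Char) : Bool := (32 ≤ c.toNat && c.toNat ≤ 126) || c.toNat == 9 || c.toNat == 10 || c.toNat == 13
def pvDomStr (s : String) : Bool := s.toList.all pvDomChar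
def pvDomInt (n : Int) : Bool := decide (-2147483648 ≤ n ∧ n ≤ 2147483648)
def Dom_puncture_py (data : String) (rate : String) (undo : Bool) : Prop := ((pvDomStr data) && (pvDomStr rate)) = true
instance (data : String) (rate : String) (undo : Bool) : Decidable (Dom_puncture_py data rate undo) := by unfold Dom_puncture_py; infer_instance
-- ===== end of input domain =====

-- B re-implements the puncture branch block-wise (stride over the string, slice
-- each block) instead of A's textwrap.wrap comprehension / flat enumerate+modulo
-- filter; objective: alternative decomposition, return value proved equal on Pre_.

-- ===== PORT A =====
-- textwrap.wrap(s, n): exact for the data Pre_ admits on the undo branches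
-- (no whitespace and no '-'), where wrap is plain fixed-size chunking.
def pyWrapNW (n : Nat) (s : List Char) : List (List Char) :=
  match s with
  | [] => []
  | c :: rest => (c :: rest.take (n - 1)) :: pyWrapNW n (rest.drop (n - 1))
termination_by s.length
decreasing_by simp [List.length_drop]

def puncture_py (data : String) (rate : String) (undo : Bool) : String :=
  if undo = true then
    if rate = "3/4" then
      -- d[:3] + 'XX' + d[3]; d[3] is pyGet? (none = IndexError, excluded by Pre_)
      String.ofList (((pyWrapNW 4 data.toList).map (fun d =>
        PySem.List.slice d none (some 3) ++ ['X', 'X'] ++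
          ((PySem.List.pyGet? d 3).elim [] (fun c => [c])))).flatten)
    else if rate = "2/3" then
      String.ofList (((pyWrapNW 3 data.toList).map (fun d => d ++ ['X'])).flatten)
    else data
  else
    if rate = "2/3" then
      String.ofList (((PySem.List.enumerate data.toList 0).filter
        (fun p => PySem.Int.mod p.1 4 != 3)).map (·.2))
    else if rate = "3/4" then
      String.ofList (((PySem.List.enumerate data.toList 0).filter
        (fun p => PySem.Int.mod p.1 6 != 3 && PySem.Int.mod p.1 6 != 4)).map (·.2))
    else data

-- ===== PORT B =====
def puncture_py_alt (data : String) (rate : String) (undo : Bool) : String :=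
  if undo = true then
    if rate = "3/4" then
      String.ofList (((PySem.List.pyRange 0 (PySem.Str.len data) 4).map (fun i =>
        PySem.List.slice data.toList (some i) (some (i + 3)) ++ ['X', 'X'] ++
          PySem.List.slice data.toList (some (i + 3)) (some (i + 4)))).flatten)
    else if rate = "2/3" then
      String.ofList (((PySem.List.pyRange 0 (PySem.Str.len data) 3).map (fun i =>
        PySem.List.slice data.toList (some i) (some (i + 3)) ++ ['X'])).flatten)
    else data
  else
    if rate = "2/3" then
      String.ofList (((PySem.List.pyRange 0 (PySem.Str.len data) 4).map (fun i =>
        PySem.List.slice data.toList (some i) (some (i + 3)))).flatten)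
    else if rate = "3/4" then
      String.ofList (((PySem.List.pyRange 0 (PySem.Str.len data) 6).map (fun i =>
        PySem.List.slice data.toList (some i) (some (i + 3)) ++
          PySem.List.slice data.toList (some (i + 5)) (some (i + 6)))).flatten)
    else data

-- ===== PRECONDITION & SPEC =====
-- Pre_ excludes, on the undo branches only: data containing whitespace or '-'
-- (textwrap.wrap word-splits there, an accident of A's implementation — A may
-- return a whitespace/hyphen-rechunked value or raise), and, for undo '3/4',
-- data whose length is not a multiple of 4 (A raises IndexError on d[3] of the
-- short trailing block).
def Pre_puncture_py (data : String) (rate : String) (undo : Bool) : Prop :=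
  (undo = true → (rate = "2/3" ∨ rate = "3/4") →
    data.toList.all (fun c => !([' ', '\t', '\n', '\r', '-'].contains c)) = true) ∧
  (undo = true → rate = "3/4" → data.toList.length % 4 = 0)
instance (data : String) (rate : String) (undo : Bool) : Decidable (Pre_puncture_py data rate undo) := by unfold Pre_puncture_py; infer_instance

def pvWitness_puncture_py : String × String × Bool := ("11011010", "3/4", true)

def Spec_puncture_py (data : String) (rate : String) (undo : Bool) (out : String) : Prop := out = puncture_py_alt data rate undo
instance (data : String) (rate : String) (undo : Bool) (out : String) : Decidable (Spec_puncture_py data rate undo out) := by unfold Spec_puncture_py; infer_instance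

-- ===== CLAIM (what is proved, stated in full; the proofs are below) =====
def Claim_equal_puncture_py : Prop := ∀ (data : String) (rate : String) (undo : Bool), Dom_puncture_py data rate undo → Pre_puncture_py data rate undo → Spec_puncture_py data rate undo (puncture_py data rate undo)

-- ===== LEMMAS AND PROOFS =====

-- common chunked form both branch styles are reduced to
def chunkMap (n : Nat) (G : List Char → List Char) (s : List Char) : List Char :=
  match s with
  | [] => []
  | c :: rest => G (c :: rest.take (n - 1)) ++ chunkMap n G (rest.drop (n - 1))
termination_by s.length
decreasing_by simp [List.length_drop]

lemma chunkMap_nil (n : Nat) (G : List Char → List Char) : chunkMap n G [] = [] := by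
  rw [chunkMap.eq_def]

lemma chunkMap_cons (n : Nat) (G : List Char → List Char) (c : Char) (rest : List Char) :
    chunkMap n G (c :: rest) = G (c :: rest.take (n - 1)) ++ chunkMap n G (rest.drop (n - 1)) := by
  rw [chunkMap.eq_def]

lemma wrap_flatten (n : Nat) (f : List Char → List Char) (s : List Char) :
    ((pyWrapNW n s).map f).flatten = chunkMap n f s := by
  have main : ∀ (N : Nat) (s : List Char), s.length ≤ N →
      ((pyWrapNW n s).map f).flatten = chunkMap n f s := by
    intro N
    induction N with
    | zero =>
        intro s hs
        have : s = [] := List.length_eq_zero_iff.mp (by omega)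
        subst this
        rw [pyWrapNW.eq_def, chunkMap_nil]
        simp
    | succ N ih =>
        intro s hs
        match s with
        | [] => rw [pyWrapNW.eq_def, chunkMap_nil]; simp
        | c :: rest =>
          rw [pyWrapNW.eq_def, chunkMap_cons, List.map_cons, List.flatten_cons]
          congr 1
          apply ih
          simp only [List.length_drop, List.length_cons] at hs ⊢
          omega
  exact main s.length s le_rfl

lemma chunkMap_congr (n : Nat) (hn : 0 < n) (f g : List Char → List Char)
    (h : ∀ d : List Char, d.length ≤ n → f d = g d) (s : List Char) :
    chunkMap n f s = chunkMap n g s := by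
  have main : ∀ (N : Nat) (s : List Char), s.length ≤ N →
      chunkMap n f s = chunkMap n g s := by
    intro N
    induction N with
    | zero =>
        intro s hs
        have : s = [] := List.length_eq_zero_iff.mp (by omega)
        subst this
        rw [chunkMap_nil, chunkMap_nil]
    | succ N ih =>
        intro s hs
        match s with
        | [] => rw [chunkMap_nil, chunkMap_nil]
        | c :: rest =>
          rw [chunkMap_cons, chunkMap_cons]
          have hlen : (c :: rest.take (n - 1)).length ≤ n := by
            have := List.length_take_le (n - 1) rest
            simp only [List.length_cons]
            omega
          rw [h _ hlen]
          congr 1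
          apply ih
          simp only [List.length_drop, List.length_cons] at hs ⊢
          omega
  exact main s.length s le_rfl

lemma slice_shift (s : List Char) (n b : Nat) (i : Int) (hi : 0 ≤ i) :
    PySem.List.slice s (some (i + n)) (some (i + n + b))
      = PySem.List.slice (s.drop n) (some i) (some (i + b)) := by
  obtain ⟨j, rfl⟩ : ∃ j : Nat, i = (j : Int) := ⟨i.toNat, (Int.toNat_of_nonneg hi).symm⟩
  have h2 : (j : Int) + n + b = ((j + n : Nat) : Int) + ((b : Nat) : Int) := by push_cast; ring
  have h1 : (j : Int) + n = ((j + n : Nat) : Int) := by push_cast; ring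
  rw [h2, h1, PySem.List.slice_natCast_add, PySem.List.slice_natCast_add, List.drop_drop]
  rw [Nat.add_comm j n]

-- B's strided loop over index i with body F s i equals the chunked form.
lemma chunk_loop (n : Nat) (hn : 0 < n) (F : List Char → Int → List Char)
    (G : List Char → List Char)
    (h0 : ∀ t : List Char, F t 0 = G (t.take n))
    (hshift : ∀ (t : List Char) (i : Int), 0 ≤ i → F t (i + n) = F (t.drop n) i)
    (s : List Char) :
    ((PySem.List.pyRange 0 (s.length : Int) n).map (F s)).flatten = chunkMap n G s := by
  have hnz : (0 : Int) < (n : Int) := by exact_mod_cast hn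
  have count_eq : ∀ (L : Nat), 0 < L →
      (if (0 : Int) < (L : Int) then (((L : Int) - 0 + n - 1) / n).toNat else 0)
        = (L - 1) / n + 1 := by
    intro L hL
    rw [if_pos (by exact_mod_cast hL)]
    have : ((L : Int) - 0 + n - 1) = (((L - 1) + n : Nat) : Int) := by push_cast; omega
    rw [this, ← Int.natCast_div, Int.toNat_natCast, Nat.add_div_right _ hn]
  have main : ∀ (N : Nat) (s : List Char), s.length ≤ N →
      ((PySem.List.pyRange 0 (s.length : Int) n).map (F s)).flatten = chunkMap n G s := by
    intro N
    induction N with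
    | zero =>
        intro s hs
        have : s = [] := List.length_eq_zero_iff.mp (by omega)
        subst this
        rw [chunkMap_nil]
        rw [PySem.List.pyRange_of_pos 0 _ hnz]
        simp
    | succ N ih =>
        intro s hs
        match s with
        | [] =>
            rw [chunkMap_nil, PySem.List.pyRange_of_pos 0 _ hnz]
            simp
        | c :: rest =>
          rw [PySem.List.pyRange_of_pos 0 _ hnz, count_eq _ (by simp), chunkMap_cons]
          simp only [List.length_cons, Nat.add_sub_cancel]
          rw [List.range_succ_eq_map, List.map_cons, List.map_cons, List.map_map,
            List.map_map, List.flatten_cons]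
          congr 1
          · -- head block
            show F (c :: rest) (0 + (n : Int) * ((0 : Nat) : Int)) = _
            have : (0 + (n : Int) * ((0 : Nat) : Int)) = 0 := by push_cast; ring
            rw [this, h0]
            congr 1
            match n, hn with
            | (m + 1), _ => simp
          · -- remaining blocks
            have hrest : (c :: rest).drop n = rest.drop (n - 1) := by
              match n, hn with
              | (m + 1), _ => simp
            have hstep : ∀ k ∈ List.range (rest.length / n),
                ((F (c :: rest) ∘ fun k : Nat => 0 + (n : Int) * (k : Int)) ∘ Nat.succ) k
                  = F (rest.drop (n - 1)) (0 + (n : Int) * (k : Int)) := by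
              intro k _
              show F (c :: rest) (0 + (n : Int) * ((k + 1 : Nat) : Int)) = _
              have harg : (0 + (n : Int) * ((k + 1 : Nat) : Int))
                  = (0 + (n : Int) * (k : Int)) + n := by push_cast; ring
              rw [harg, hshift _ _ (by positivity), hrest]
            rw [List.map_congr_left hstep]
            have hlen : (rest.drop (n - 1)).length ≤ N := by
              simp only [List.length_drop, List.length_cons] at hs ⊢
              omega
            have ihx := ih (rest.drop (n - 1)) hlen
            rw [PySem.List.pyRange_of_pos 0 _ hnz] at ihx
            have hcnt : (if (0 : Int) < (((rest.drop (n - 1)).length : Nat) : Int)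
                then (((((rest.drop (n - 1)).length : Nat) : Int) - 0 + n - 1) / n).toNat else 0)
                  = rest.length / n := by
              by_cases hpos : 0 < (rest.drop (n - 1)).length
              · rw [count_eq _ hpos]
                simp only [List.length_drop] at hpos ⊢
                have h1 : rest.length - (n - 1) - 1 = rest.length - n := by omega
                rw [h1]
                have h2 : rest.length - n + n = rest.length := by omega
                calc (rest.length - n) / n + 1 = (rest.length - n + n) / n := by
                      rw [Nat.add_div_right _ hn]
                  _ = rest.length / n := by rw [h2]
              · rw [if_neg (by exact_mod_cast hpos)]
                simp only [List.length_drop] at hpos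
                rw [Nat.div_eq_of_lt (by omega)]
            rw [hcnt, List.map_map] at ihx
            exact ihx
  exact main s.length s le_rfl

-- shifting the enumerate start by the period does not change the filtered bits
lemma enum_shift (n : Nat) (P : Int → Bool)
    (hper : ∀ i : Int, 0 ≤ i → P (i + n) = P i) :
    ∀ (u : List Char) (a : Int), 0 ≤ a →
      ((PySem.List.enumerate u (a + n)).filter (fun p => P p.1)).map (·.2)
        = ((PySem.List.enumerate u a).filter (fun p => P p.1)).map (·.2) := by
  intro u
  induction u with
  | nil => intro a _; simp [PySem.List.enumerate_nil]
  | cons x u ih =>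
    intro a ha
    rw [PySem.List.enumerate_cons, PySem.List.enumerate_cons]
    simp only [List.filter_cons]
    have hP : P (a + n) = P a := hper a ha
    have h2 : a + n + 1 = (a + 1) + n := by ring
    rw [hP, h2]
    cases hPa : P a <;> simp [hPa, ih (a + 1) (by omega)]

-- A's flat enumerate+modulo filter equals the chunked form.
lemma enum_chunk (n : Nat) (hn : 0 < n) (P : Int → Bool) (G : List Char → List Char)
    (hper : ∀ i : Int, 0 ≤ i → P (i + n) = P i)
    (hG : ∀ d : List Char, d.length ≤ n →
      ((PySem.List.enumerate d 0).filter (fun p => P p.1)).map (·.2) = G d)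
    (s : List Char) :
    ((PySem.List.enumerate s 0).filter (fun p => P p.1)).map (·.2) = chunkMap n G s := by
  have main : ∀ (N : Nat) (s : List Char), s.length ≤ N →
      ((PySem.List.enumerate s 0).filter (fun p => P p.1)).map (·.2) = chunkMap n G s := by
    intro N
    induction N with
    | zero =>
        intro s hs
        have : s = [] := List.length_eq_zero_iff.mp (by omega)
        subst this
        simp [PySem.List.enumerate_nil, chunkMap_nil]
    | succ N ih =>
        intro s hs
        match s with
        | [] => simp [PySem.List.enumerate_nil, chunkMap_nil]
        | c :: rest =>
          by_cases hle : (c :: rest).length ≤ n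
          · rw [hG _ hle, chunkMap_cons]
            have h1 : rest.take (n - 1) = rest := by
              apply List.take_of_length_le
              simp only [List.length_cons] at hle
              omega
            have h2 : rest.drop (n - 1) = [] := by
              apply List.drop_eq_nil_of_le
              simp only [List.length_cons] at hle
              omega
            rw [h1, h2, chunkMap_nil, List.append_nil]
          · push_neg at hle
            have hsplit := List.take_append_drop n (c :: rest)
            conv_lhs => rw [← hsplit]
            rw [PySem.List.enumerate_append, List.filter_append, List.map_append]
            have htklen : ((c :: rest).take n).length = n := by
              rw [List.length_take]
              omega
            have hG1 : ((PySem.List.enumerate ((c :: rest).take n) 0).filter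
                (fun p => P p.1)).map (·.2) = G ((c :: rest).take n) :=
              hG _ (by omega)
            rw [hG1]
            have hstart : (0 : Int) + (((c :: rest).take n).length : Int) = 0 + (n : Int) := by
              rw [htklen]
            rw [hstart, enum_shift n P hper _ 0 le_rfl]
            have hlen : ((c :: rest).drop n).length ≤ N := by
              simp only [List.length_drop, List.length_cons] at hs ⊢
              omega
            rw [ih _ hlen, chunkMap_cons]
            congr 1
            · congr 1
              match n, hn with
              | (m + 1), _ => simp
            · congr 1
              match n, hn with
              | (m + 1), _ => simp
  exact main s.length s le_rfl

lemma mod_period (m : Int) (hm : (0 : Int) < m) (i : Int) :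
    PySem.Int.mod (i + m) m = PySem.Int.mod i m := by
  rw [PySem.Int.mod_eq_emod_of_pos hm, PySem.Int.mod_eq_emod_of_pos hm, Int.add_emod_right]

lemma slice03 (t : List Char) (n : Nat) (hn : 3 ≤ n) :
    PySem.List.slice t (some 0) (some (0 + 3)) = ((t.take n).take 3).take 3 := by
  rw [show ((0 : Int) + 3) = ((3 : Nat) : Int) by norm_num,
    show (some (0 : Int)) = some ((0 : Nat) : Int) by norm_num,
    PySem.List.slice_natCast, List.take_take, List.take_take]
  congr 1
  omega

-- non-undo '2/3': flat enumerate+mod-4 filter = strided block slicing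
lemma branch_p23 (s : List Char) :
    ((PySem.List.enumerate s 0).filter (fun p => PySem.Int.mod p.1 4 != 3)).map (·.2)
      = ((PySem.List.pyRange 0 (s.length : Int) 4).map (fun i =>
          PySem.List.slice s (some i) (some (i + 3)))).flatten := by
  refine (enum_chunk 4 (by norm_num) (fun i => PySem.Int.mod i 4 != 3)
      (fun d => (d.take 3).take 3) ?_ ?_ s).trans
    (chunk_loop 4 (by norm_num)
      (fun t i => PySem.List.slice t (some i) (some (i + 3)))
      (fun d => (d.take 3).take 3) ?_ ?_ s).symm
  · intro i hi
    show (PySem.Int.mod (i + ((4 : Nat) : Int)) 4 != 3) = (PySem.Int.mod i 4 != 3)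
    rw [show ((4 : Nat) : Int) = (4 : Int) by norm_num, mod_period 4 (by norm_num)]
  · intro d hd
    show ((PySem.List.enumerate d 0).filter (fun p => PySem.Int.mod p.1 4 != 3)).map (·.2)
      = (d.take 3).take 3
    rw [List.take_take]
    rcases d with _ | ⟨a, _ | ⟨b, _ | ⟨c, _ | ⟨e, tl⟩⟩⟩⟩
    · simp [PySem.List.enumerate_nil]
    · simp [PySem.List.enumerate_cons, PySem.List.enumerate_nil]
    · simp [PySem.List.enumerate_cons, PySem.List.enumerate_nil]
    · simp [PySem.List.enumerate_cons, PySem.List.enumerate_nil]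
    · simp only [List.length_cons] at hd
      have h : tl = [] := List.length_eq_zero_iff.mp (by omega)
      subst h
      simp [PySem.List.enumerate_cons, PySem.List.enumerate_nil]
  · intro t
    exact slice03 t 4 (by norm_num)
  · intro t i hi
    show PySem.List.slice t (some (i + ((4 : Nat) : Int))) (some (i + ((4 : Nat) : Int) + 3)) = _
    simpa using slice_shift t 4 3 i hi

-- non-undo '3/4': flat enumerate+mod-6 filter = strided block slicing
lemma branch_p34 (s : List Char) :
    ((PySem.List.enumerate s 0).filter
        (fun p => PySem.Int.mod p.1 6 != 3 && PySem.Int.mod p.1 6 != 4)).map (·.2)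
      = ((PySem.List.pyRange 0 (s.length : Int) 6).map (fun i =>
          PySem.List.slice s (some i) (some (i + 3)) ++
            PySem.List.slice s (some (i + 5)) (some (i + 6)))).flatten := by
  refine (enum_chunk 6 (by norm_num)
      (fun i => PySem.Int.mod i 6 != 3 && PySem.Int.mod i 6 != 4)
      (fun d => d.take 3 ++ (d.drop 5).take 1) ?_ ?_ s).trans
    (chunk_loop 6 (by norm_num)
      (fun t i => PySem.List.slice t (some i) (some (i + 3)) ++
        PySem.List.slice t (some (i + 5)) (some (i + 6)))
      (fun d => d.take 3 ++ (d.drop 5).take 1) ?_ ?_ s).symm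
  · intro i hi
    show (PySem.Int.mod (i + ((6 : Nat) : Int)) 6 != 3 && PySem.Int.mod (i + ((6 : Nat) : Int)) 6 != 4)
      = (PySem.Int.mod i 6 != 3 && PySem.Int.mod i 6 != 4)
    rw [show ((6 : Nat) : Int) = (6 : Int) by norm_num, mod_period 6 (by norm_num)]
  · intro d hd
    show ((PySem.List.enumerate d 0).filter
        (fun p => PySem.Int.mod p.1 6 != 3 && PySem.Int.mod p.1 6 != 4)).map (·.2)
      = d.take 3 ++ (d.drop 5).take 1
    rcases d with _ | ⟨a, _ | ⟨b, _ | ⟨c, _ | ⟨e, _ | ⟨f, _ | ⟨g, tl⟩⟩⟩⟩⟩⟩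
    · simp [PySem.List.enumerate_nil]
    · simp [PySem.List.enumerate_cons, PySem.List.enumerate_nil]
    · simp [PySem.List.enumerate_cons, PySem.List.enumerate_nil]
    · simp [PySem.List.enumerate_cons, PySem.List.enumerate_nil]
    · simp [PySem.List.enumerate_cons, PySem.List.enumerate_nil]
    · simp [PySem.List.enumerate_cons, PySem.List.enumerate_nil]
    · simp only [List.length_cons] at hd
      have h : tl = [] := List.length_eq_zero_iff.mp (by omega)
      subst h
      simp [PySem.List.enumerate_cons, PySem.List.enumerate_nil]
  · intro t
    show PySem.List.slice t (some 0) (some (0 + 3)) ++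
        PySem.List.slice t (some (0 + 5)) (some (0 + 6))
      = (t.take 6).take 3 ++ ((t.take 6).drop 5).take 1
    congr 1
    · rw [slice03 t 6 (by norm_num)]
      simp [List.take_take]
    · rw [show ((0 : Int) + 5) = ((5 : Nat) : Int) by norm_num,
        show ((0 : Int) + 6) = ((5 : Nat) : Int) + ((1 : Nat) : Int) by norm_num,
        PySem.List.slice_natCast_add, List.drop_take]
      simp [List.take_take]
  · intro t i hi
    show PySem.List.slice t (some (i + ((6 : Nat) : Int))) (some (i + ((6 : Nat) : Int) + 3)) ++
        PySem.List.slice t (some (i + ((6 : Nat) : Int) + 5)) (some (i + ((6 : Nat) : Int) + 6)) = _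
    have e1 : PySem.List.slice t (some (i + (6 : Int))) (some (i + (6 : Int) + 3))
        = PySem.List.slice (t.drop 6) (some i) (some (i + 3)) := by
      simpa using slice_shift t 6 3 i hi
    have e2 : PySem.List.slice t (some (i + 5 + (6 : Int))) (some (i + 5 + (6 : Int) + 1))
        = PySem.List.slice (t.drop 6) (some (i + 5)) (some (i + 5 + 1)) := by
      simpa using slice_shift t 6 1 (i + 5) (by omega)
    rw [show ((6 : Nat) : Int) = (6 : Int) by norm_num, e1,
      show (i + (6 : Int) + 5) = i + 5 + 6 by ring,
      show (i + (6 : Int) + 6) = i + 5 + 6 + 1 by ring, e2,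
      show (i + (5 : Int) + 1) = i + 6 by ring]

-- undo '2/3': wrap-chunks + 'X' = strided block slicing + 'X'
lemma branch_u23 (s : List Char) :
    ((pyWrapNW 3 s).map (fun d => d ++ ['X'])).flatten
      = ((PySem.List.pyRange 0 (s.length : Int) 3).map (fun i =>
          PySem.List.slice s (some i) (some (i + 3)) ++ ['X'])).flatten := by
  rw [wrap_flatten]
  refine (chunkMap_congr 3 (by norm_num) _ (fun d => (d.take 3).take 3 ++ ['X']) ?_ s).trans
    (chunk_loop 3 (by norm_num)
      (fun t i => PySem.List.slice t (some i) (some (i + 3)) ++ ['X'])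
      (fun d => (d.take 3).take 3 ++ ['X']) ?_ ?_ s).symm
  · intro d hd
    show d ++ ['X'] = List.take 3 (List.take 3 d) ++ ['X']
    simp [List.take_take, List.take_of_length_le hd]
  · intro t
    show PySem.List.slice t (some 0) (some (0 + 3)) ++ ['X']
      = ((List.take 3 t).take 3).take 3 ++ ['X']
    rw [slice03 t 3 (by norm_num)]
  · intro t i hi
    show PySem.List.slice t (some (i + ((3 : Nat) : Int))) (some (i + ((3 : Nat) : Int) + 3)) ++ ['X'] = _
    have e1 : PySem.List.slice t (some (i + (3 : Int))) (some (i + (3 : Int) + 3))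
        = PySem.List.slice (t.drop 3) (some i) (some (i + 3)) := by
      simpa using slice_shift t 3 3 i hi
    rw [show ((3 : Nat) : Int) = (3 : Int) by norm_num, e1]

-- undo '3/4': wrap-chunks sliced + 'XX' + d[3] = strided block slicing
lemma branch_u34 (s : List Char) :
    ((pyWrapNW 4 s).map (fun d =>
        PySem.List.slice d none (some 3) ++ ['X', 'X'] ++
          ((PySem.List.pyGet? d 3).elim [] (fun c => [c])))).flatten
      = ((PySem.List.pyRange 0 (s.length : Int) 4).map (fun i =>
          PySem.List.slice s (some i) (some (i + 3)) ++ ['X', 'X'] ++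
            PySem.List.slice s (some (i + 3)) (some (i + 4)))).flatten := by
  have hidx : ∀ d : List Char,
      (PySem.List.pyGet? d (3 : Int)).elim ([] : List Char) (fun c => [c])
        = (d.drop 3).take 1 := by
    intro d
    rw [show (3 : Int) = ((3 : Nat) : Int) by norm_num, PySem.List.pyGet?_natCast]
    rcases d with _ | ⟨a, _ | ⟨b, _ | ⟨c, _ | ⟨e, tl⟩⟩⟩⟩ <;> simp
  rw [wrap_flatten]
  refine (chunkMap_congr 4 (by norm_num) _
      (fun d => d.take 3 ++ ['X', 'X'] ++ (d.drop 3).take 1) ?_ s).trans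
    (chunk_loop 4 (by norm_num)
      (fun t i => PySem.List.slice t (some i) (some (i + 3)) ++ ['X', 'X'] ++
        PySem.List.slice t (some (i + 3)) (some (i + 4)))
      (fun d => d.take 3 ++ ['X', 'X'] ++ (d.drop 3).take 1) ?_ ?_ s).symm
  · intro d hd
    rw [hidx d, show (3 : Int) = ((3 : Nat) : Int) by norm_num, PySem.List.slice_to_natCast]
  · intro t
    show PySem.List.slice t (some 0) (some (0 + 3)) ++ ['X', 'X'] ++
        PySem.List.slice t (some (0 + 3)) (some (0 + 4))
      = (t.take 4).take 3 ++ ['X', 'X'] ++ ((t.take 4).drop 3).take 1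
    congr 1
    · congr 1
      rw [slice03 t 4 (by norm_num)]
      simp [List.take_take]
    · rw [show ((0 : Int) + 3) = ((3 : Nat) : Int) by norm_num,
        show ((0 : Int) + 4) = ((3 : Nat) : Int) + ((1 : Nat) : Int) by norm_num,
        PySem.List.slice_natCast_add, List.drop_take]
      simp [List.take_take]
  · intro t i hi
    show PySem.List.slice t (some (i + ((4 : Nat) : Int))) (some (i + ((4 : Nat) : Int) + 3)) ++ ['X', 'X'] ++
        PySem.List.slice t (some (i + ((4 : Nat) : Int) + 3)) (some (i + ((4 : Nat) : Int) + 4)) = _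
    have e1 : PySem.List.slice t (some (i + (4 : Int))) (some (i + (4 : Int) + 3))
        = PySem.List.slice (t.drop 4) (some i) (some (i + 3)) := by
      simpa using slice_shift t 4 3 i hi
    have e2 : PySem.List.slice t (some (i + 3 + (4 : Int))) (some (i + 3 + (4 : Int) + 1))
        = PySem.List.slice (t.drop 4) (some (i + 3)) (some (i + 3 + 1)) := by
      simpa using slice_shift t 4 1 (i + 3) (by omega)
    rw [show ((4 : Nat) : Int) = (4 : Int) by norm_num, e1,
      show (i + (4 : Int) + 3) = i + 3 + 4 by ring,
      show (i + (4 : Int) + 4) = i + 3 + 4 + 1 by ring, e2,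
      show (i + (3 : Int) + 1) = i + 4 by ring]

-- ===== VERDICT (by name: the statement is the Claim_ definition above) =====
theorem puncture_py_spec : Claim_equal_puncture_py := by
  unfold Claim_equal_puncture_py
  intro data rate undo _hdom _hpre
  unfold Spec_puncture_py puncture_py puncture_py_alt
  rw [PySem.Str.len_eq]
  by_cases h34 : rate = "3/4"
  · subst h34
    cases undo <;> simp only [reduceIte]
    · exact congrArg String.ofList (branch_p34 data.toList)
    · exact congrArg String.ofList (branch_u34 data.toList)
  · by_cases h23 : rate = "2/3"
    · subst h23
      cases undo <;> simp only [reduceIte, h34]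
      · exact congrArg String.ofList (branch_p23 data.toList)
      · exact congrArg String.ofList (branch_u23 data.toList)
    · cases undo <;> simp only [reduceIte, h34, h23]
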